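-- pv_equiv track=rewrite | github.com/YaredRiveros/BD2-proyecto3 | test.py | update_image_paths
-- ===== SOURCE A (Python) =====
-- def update_image_paths(image_paths):
--     name_count = {}
--     updated_paths = []
--
--     for path in image_paths:
--         parts = path.split('/')
--         name = parts[-2]  # Obtener el nombre de la carpeta padre
--
--         if name in name_count:
--             name_count[name] += 1
--         else:
--             name_count[name] = 1
--
--         filename = parts[-1]
--         filename_parts = filename.split('_')
--         filename_parts[-1] = "{:04d}.jpg".format(name_count[name])
--         updated_filename = "_".join(filename_parts)
--         parts[-1] = updated_filename
--
--         updated_path = "/".join(parts)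
--         updated_paths.append(updated_path)
--
--     return updated_paths
-- ===== SOURCE B (Python) =====
-- def _renumber(path, n):
--     parts = path.split('/')
--     filename_parts = parts[-1].split('_')
--     filename_parts[-1] = "{:04d}.jpg".format(n)
--     parts[-1] = '_'.join(filename_parts)
--     return '/'.join(parts)
--
--
-- def update_image_paths(image_paths):
--     # Stage 1: index the input by parent folder (insertion order preserved).
--     groups = {}
--     for i, p in enumerate(image_paths):
--         groups.setdefault(p.split('/')[-2], []).append(i)
--     # Stage 2: number each folder's paths 1,2,3... and write results back
--     # into their original positions.
--     result = [""] * len(image_paths)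
--     for idxs in groups.values():
--         for j, i in enumerate(idxs):
--             result[i] = _renumber(image_paths[i], j + 1)
--     return result
-- ===== Notes on version B (the rewrite author's own statement) =====
-- stated objective: alternative
-- what changed: Replaces A's single sweep threading a running per-folder counter with two staged passes: first build a dict mapping each parent folder to the list of input indices where it occurs, then number each folder's index list 1,2,3... and write the rebuilt paths into a pre-sized result list at their original positions.
import Mathlib
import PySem

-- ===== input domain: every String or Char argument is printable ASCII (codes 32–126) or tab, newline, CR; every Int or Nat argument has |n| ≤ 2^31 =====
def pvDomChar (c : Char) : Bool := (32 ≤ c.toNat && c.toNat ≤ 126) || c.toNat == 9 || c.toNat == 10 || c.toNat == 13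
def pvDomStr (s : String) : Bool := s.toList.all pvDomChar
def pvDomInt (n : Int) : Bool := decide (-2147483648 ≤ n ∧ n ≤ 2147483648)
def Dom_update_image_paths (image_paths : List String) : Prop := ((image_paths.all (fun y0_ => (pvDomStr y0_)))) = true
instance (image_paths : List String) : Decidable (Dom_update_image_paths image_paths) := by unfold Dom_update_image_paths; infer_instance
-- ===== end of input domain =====

-- B is an alternative two-stage decomposition: first index the input by parent folder
-- (a dict folder -> list of positions), then number each folder's positions 1,2,3...
-- and write the rebuilt paths back at their original positions.

-- s.split(sep) for a nonempty sep (exact there; never raises for nonempty sep)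
def pySplit (s sep : String) : List String := (PySem.Str.split? s sep).getD []

-- the Python format string "{:04d}.jpg" (exact: "{:04d}".format(n) = str(n).zfill(4))
def fmt04jpg (n : Int) : String :=
  PySem.Str.join "" [PySem.Str.zfill (PySem.Int.toStr n) 4, ".jpg"]

-- ===== PORT A =====
-- one iteration of A's loop; state = (name_count, updated_paths)
def stepA (st : PySem.Dict String Int × List String) (path : String) :
    PySem.Dict String Int × List String :=
  let parts := pySplit path "/"
  -- parts[-2]: Pre_ guarantees parts has ≥ 2 elements, so pyGetD is exact there
  let name := PySem.List.pyGetD parts (-2) ""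
  let nc := if st.1.contains name then st.1.insert name (st.1.getD name 0 + 1)
            else st.1.insert name 1
  let filename := PySem.List.pyGetD parts (-1) ""   -- split never returns [], exact
  let fps := PySem.Str.split? filename "_" |>.getD []
  let fps2 := fps.dropLast ++ [fmt04jpg (nc.getD name 0)]   -- filename_parts[-1] = …
  let parts2 := parts.dropLast ++ [PySem.Str.join "_" fps2]  -- parts[-1] = …
  (nc, st.2 ++ [PySem.Str.join "/" parts2])

def update_image_paths (image_paths : List String) : List String :=
  (image_paths.foldl stepA (PySem.Dict.empty, [])).2

-- ===== PORT B =====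
-- _renumber(path, n) from Source B
def renumberB (path : String) (n : Int) : String :=
  let parts := pySplit path "/"
  let fps := pySplit (PySem.List.pyGetD parts (-1) "") "_"
  let fps2 := fps.dropLast ++ [fmt04jpg n]
  PySem.Str.join "/" (parts.dropLast ++ [PySem.Str.join "_" fps2])

-- p.split('/')[-2] (exact under Pre_)
def nameOfB (p : String) : String :=
  PySem.List.pyGetD (pySplit p "/") (-2) ""

-- groups.setdefault(name, []).append(i): overwrite keeps the key's position, as Python does
def buildG (d : PySem.Dict String (List Int)) (ip : Int × String) :
    PySem.Dict String (List Int) :=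
  d.insert (nameOfB ip.2) (d.getD (nameOfB ip.2) [] ++ [ip.1])

-- result[i] = _renumber(image_paths[i], j + 1); i comes from enumerate so 0 ≤ i,
-- hence .toNat is exact (no negative-index wraparound is ever reached)
def writeOne (xs : List String) (r : List String) (ji : Int × Int) : List String :=
  r.set ji.2.toNat (renumberB (PySem.List.pyGetD xs ji.2 "") (ji.1 + 1))

-- the inner 'for j, i in enumerate(idxs)' loop
def writeGroup (xs : List String) (res : List String) (idxs : List Int) : List String :=
  (PySem.List.enumerate idxs 0).foldl (writeOne xs) res

def update_image_paths_alt (image_paths : List String) : List String :=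
  let groups := (PySem.List.enumerate image_paths 0).foldl buildG PySem.Dict.empty
  groups.values.foldl (writeGroup image_paths) (List.replicate image_paths.length "")

-- ===== PRECONDITION & SPEC =====
-- Pre_ excludes exactly the inputs where the Python A raises IndexError: a path with
-- no '/' makes parts[-2] fail (B raises there too).
def Pre_update_image_paths (image_paths : List String) : Prop :=
  ∀ p ∈ image_paths, 2 ≤ (pySplit p "/").length
instance (image_paths : List String) : Decidable (Pre_update_image_paths image_paths) := by
  unfold Pre_update_image_paths; infer_instance

def pvWitness_update_image_paths : List String :=
  ["cats/img_001.jpg", "dogs/img_1.jpg", "cats/img_x_2.jpg"]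

def Spec_update_image_paths (image_paths : List String) (out : List String) : Prop :=
  out = update_image_paths_alt image_paths
instance (image_paths : List String) (out : List String) :
    Decidable (Spec_update_image_paths image_paths out) := by
  unfold Spec_update_image_paths; infer_instance

-- ===== CLAIM (what is proved, stated in full; the proofs are below) =====
def Claim_equal_update_image_paths : Prop :=
  ∀ (image_paths : List String), Dom_update_image_paths image_paths →
    Pre_update_image_paths image_paths →
    Spec_update_image_paths image_paths (update_image_paths image_paths)

-- ===== LEMMAS AND PROOFS =====

-- the common closed form both sides are reduced to: position k carries the rebuild
-- numbered by the count of k's folder among the first k+1 paths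
def cfF (xs : List String) (k : Nat) : String :=
  renumberB (xs.getD k "")
    ((((xs.take (k+1)).map nameOfB).count (nameOfB (xs.getD k "")) : Int))

-- ---------- A side (running-counter sweep ⇒ closed form) ----------

theorem stepA_eq (d : PySem.Dict String Int) (acc : List String) (p : String) :
    stepA (d, acc) p
      = (d.insert (nameOfB p) (d.getD (nameOfB p) 0 + 1),
         acc ++ [renumberB p (d.getD (nameOfB p) 0 + 1)]) := by
  unfold stepA renumberB nameOfB pySplit
  by_cases h : d.contains (PySem.List.pyGetD ((PySem.Str.split? p "/").getD []) (-2) "") = true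
  · simp [h, PySem.Dict.getD_insert_self]
  · have hc : d.contains (PySem.List.pyGetD ((PySem.Str.split? p "/").getD []) (-2) "") = false := by
      simpa using h
    have h0 : d.getD (PySem.List.pyGetD ((PySem.Str.split? p "/").getD []) (-2) "") 0 = 0 :=
      PySem.Dict.getD_of_not_contains _ _ hc
    simp [h, h0, PySem.Dict.getD_insert_self]

set_option maxHeartbeats 800000 in
theorem loopA (xs : List String) : ∀ (d : PySem.Dict String Int) (acc : List String),
    (xs.foldl stepA (d, acc)).2
      = acc ++ (List.range xs.length).map (fun k =>
          renumberB (xs.getD k "")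
            (d.getD (nameOfB (xs.getD k "")) 0
              + (((xs.take (k+1)).map nameOfB).count (nameOfB (xs.getD k "")) : Int))) := by
  induction xs with
  | nil => intro d acc; simp
  | cons p rest ih =>
    intro d acc
    rw [List.foldl_cons, stepA_eq, ih]
    rw [List.append_assoc, List.length_cons, List.range_succ_eq_map, List.map_cons,
      List.map_map]
    refine congrArg (fun t => acc ++ t) ?_
    rw [List.singleton_append]
    refine congrArg₂ List.cons ?_ ?_
    · simp
    · apply List.map_congr_left
      intro k _
      simp only [Function.comp, List.getD_cons_succ, List.take_succ_cons, List.map_cons,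
        List.count_cons, PySem.Dict.getD_insert]
      by_cases hnm : nameOfB (rest.getD k "") = nameOfB p
      · rw [if_pos hnm, if_pos (by simp only [beq_iff_eq]; exact hnm.symm), hnm]
        refine congrArg _ ?_
        push_cast; ring
      · rw [if_neg hnm, if_neg (by simp only [beq_iff_eq]; exact fun h => hnm h.symm)]
        refine congrArg _ ?_
        push_cast; ring

theorem portA_eq (xs : List String) :
    update_image_paths xs = (List.range xs.length).map (cfF xs) := by
  unfold update_image_paths
  rw [loopA, List.nil_append]
  apply List.map_congr_left
  intro k _
  unfold cfF
  rw [PySem.Dict.getD_empty, zero_add]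

-- ---------- B side: generic write machinery ----------

def applyWrites (ws : List (Nat × String)) (res : List String) : List String :=
  ws.foldl (fun r w => r.set w.1 w.2) res

theorem applyWrites_length (ws : List (Nat × String)) : ∀ res,
    (applyWrites ws res).length = res.length := by
  induction ws with
  | nil => intro res; rfl
  | cons w ws ih => intro res; unfold applyWrites at *; rw [List.foldl_cons, ih]; simp

theorem applyWrites_getD (ws : List (Nat × String)) : ∀ (res : List String) (k : Nat),
    (∀ w ∈ ws, w.1 < res.length) →
    (applyWrites ws res).getD k ""
      = match ws.reverse.find? (fun w => w.1 == k) with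
        | some w => w.2
        | none => res.getD k "" := by
  induction ws with
  | nil => intro res k _; rfl
  | cons w ws ih =>
    intro res k hlt
    have hstep : applyWrites (w :: ws) res = applyWrites ws (res.set w.1 w.2) := rfl
    rw [hstep, ih (res.set w.1 w.2) k (by
      intro w' hw'; rw [List.length_set]; exact hlt w' (List.mem_cons_of_mem _ hw'))]
    rw [List.reverse_cons, List.find?_append]
    cases hfind : ws.reverse.find? (fun w => w.1 == k) with
    | some w' => simp
    | none =>
      simp only [Option.none_or]
      by_cases hk : w.1 = k
      · subst hk
        have hlen : w.1 < res.length := hlt w (List.mem_cons_self)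
        simp [List.getD, hlen]
      · have : (fun (w : Nat × String) => w.1 == k) w = false := by simpa using hk
        simp only [List.find?_singleton, this]
        simp [List.getD, hk]

-- ---------- B side: characterizing the groups dict ----------

theorem buildG_getD (l : List (Int × String)) : ∀ (d : PySem.Dict String (List Int)) name,
    (l.foldl buildG d).getD name []
      = d.getD name [] ++ (l.filter (fun ip => nameOfB ip.2 == name)).map (·.1) := by
  induction l with
  | nil => intro d name; simp
  | cons ip l ih =>
    intro d name
    rw [List.foldl_cons, ih]
    by_cases h : nameOfB ip.2 = name
    · rw [List.filter_cons_of_pos (by simpa using h)]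
      unfold buildG
      rw [PySem.Dict.getD_insert, if_pos h.symm, h]
      simp
    · rw [List.filter_cons_of_neg (by simpa using h)]
      unfold buildG
      rw [PySem.Dict.getD_insert, if_neg (fun hh => h hh.symm)]

-- enumerate as a map over range
theorem enum_eq (xs : List String) :
    PySem.List.enumerate xs 0
      = (List.range xs.length).map (fun k => (Int.ofNat k, xs.getD k "")) := by
  apply List.ext_getElem
  · simp [PySem.List.length_enumerate]
  · intro k h1 h2
    have hk : k < xs.length := by simpa [PySem.List.length_enumerate] using h1
    rw [PySem.List.getElem_enumerate]
    simp [List.getElem?_eq_getElem hk, Int.ofNat_eq_natCast]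

-- take as a map over range
theorem take_eq_map_range (xs : List String) (m : Nat) (hm : m ≤ xs.length) :
    xs.take m = (List.range m).map (fun k => xs.getD k "") := by
  apply List.ext_getElem
  · simp; omega
  · intro k h1 h2
    have hk : k < xs.length := by simp at h1; omega
    simp [List.getElem?_eq_getElem hk]

-- the filter-of-range rank lemma: if i is the j-th index satisfying P, then
-- exactly j+1 indices ≤ i satisfy P
theorem filter_range_rank (P : Nat → Bool) :
    ∀ (n j i : Nat), ((List.range n).filter P)[j]? = some i →
      ((List.range (i+1)).filter P).length = j + 1 := by
  intro n
  induction n with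
  | zero => intro j i h; simp at h
  | succ n ih =>
    intro j i h
    rw [List.range_succ, List.filter_append] at h
    by_cases hj : j < ((List.range n).filter P).length
    · rw [List.getElem?_append_left hj] at h
      exact ih j i h
    · rw [List.getElem?_append_right (le_of_not_gt hj)] at h
      cases hP : P n with
      | false => simp [hP] at h
      | true =>
        simp only [List.filter_singleton, hP, cond_true] at h
        have hj0 : j - ((List.range n).filter P).length = 0 := by
          cases hjj : j - ((List.range n).filter P).length with
          | zero => rfl
          | succ m => rw [hjj] at h; simp at h
        rw [hj0] at h
        simp only [List.getElem?_cons_zero, Option.some.injEq] at h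
        subst h
        have hlen : ((List.range (n+1)).filter P).length
            = ((List.range n).filter P).length + 1 := by
          simp [List.range_succ, List.filter_append, hP]
        rw [hlen]; omega

-- the groups dict of B
def groupsOf (xs : List String) : PySem.Dict String (List Int) :=
  (PySem.List.enumerate xs 0).foldl buildG PySem.Dict.empty

theorem buildG_nodup_keys (l : List (Int × String)) :
    ∀ (d : PySem.Dict String (List Int)), d.keys.Nodup → (l.foldl buildG d).keys.Nodup := by
  induction l with
  | nil => intro d hd; exact hd
  | cons ip l ih =>
    intro d hd
    exact ih _ (PySem.Dict.nodup_keys_insert _ _ _ hd)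

theorem groups_nodup_keys (xs : List String) : (groupsOf xs).keys.Nodup :=
  buildG_nodup_keys _ _ PySem.Dict.nodup_keys_empty

-- membership in the keys of the groups dict
theorem buildG_mem_keys (l : List (Int × String)) :
    ∀ (d : PySem.Dict String (List Int)) (name : String),
      name ∈ (l.foldl buildG d).keys ↔
        name ∈ d.keys ∨ name ∈ l.map (fun ip => nameOfB ip.2) := by
  induction l with
  | nil => intro d name; simp
  | cons ip l ih =>
    intro d name
    rw [List.foldl_cons, ih]
    show _ ∈ (d.insert _ _).keys ∨ _ ↔ _
    rw [PySem.Dict.mem_keys_insert]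
    simp only [List.map_cons, List.mem_cons]
    tauto

-- every group value is the increasing list of ALL indices of its folder
theorem groups_getD (xs : List String) (name : String) :
    (groupsOf xs).getD name []
      = ((List.range xs.length).filter
          (fun k => nameOfB (xs.getD k "") == name)).map Int.ofNat := by
  unfold groupsOf
  rw [buildG_getD, PySem.Dict.getD_empty, List.nil_append, enum_eq, List.filter_map,
    List.map_map]
  exact congrArg₂ List.map (funext fun k => rfl) (List.filter_congr fun k _ => rfl)

-- the per-position rank equals the prefix count used by the closed form
theorem rank_eq_cnt (xs : List String) (name : String) (j i : Nat)
    (h : (((List.range xs.length).filter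
        (fun k => nameOfB (xs.getD k "") == name)))[j]? = some i) :
    i < xs.length ∧ nameOfB (xs.getD i "") = name ∧
    (((xs.take (i+1)).map nameOfB).count (nameOfB (xs.getD i "")) : Int) = (j : Int) + 1 := by
  have hmem : i ∈ (List.range xs.length).filter (fun k => nameOfB (xs.getD k "") == name) :=
    List.mem_of_getElem? h
  have hi : i < xs.length := by
    have := List.mem_filter.mp hmem
    simpa using this.1
  have hP : nameOfB (xs.getD i "") = name := by
    have := List.mem_filter.mp hmem
    simpa using this.2
  refine ⟨hi, hP, ?_⟩
  have hrank := filter_range_rank (fun k => nameOfB (xs.getD k "") == name) xs.length j i h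
  rw [hP]
  have hcount : ((xs.take (i+1)).map nameOfB).count name
      = ((List.range (i+1)).filter (fun k => nameOfB (xs.getD k "") == name)).length := by
    rw [take_eq_map_range xs (i+1) hi, List.map_map, List.count_eq_countP,
      List.countP_map, List.countP_eq_length_filter]
    rfl
  rw [hcount, hrank]
  push_cast; ring

-- the flat list of writes B performs
def writesOf (xs : List String) : List (Nat × String) :=
  (groupsOf xs).items.flatMap (fun kv =>
    (PySem.List.enumerate kv.2 0).map (fun ji =>
      (ji.2.toNat, renumberB (PySem.List.pyGetD xs ji.2 "") (ji.1 + 1))))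

-- B's nested folds are exactly applyWrites of that list
theorem altB_eq_applyWrites (xs : List String) :
    update_image_paths_alt xs
      = applyWrites (writesOf xs) (List.replicate xs.length "") := by
  unfold update_image_paths_alt writesOf applyWrites
  show ((groupsOf xs).values).foldl (writeGroup xs) _ = _
  rw [PySem.Dict.values]
  rw [List.foldl_map]
  generalize (groupsOf xs).items = items
  generalize (List.replicate xs.length "" : List String) = res
  induction items generalizing res with
  | nil => rfl
  | cons kv items ih =>
    rw [List.foldl_cons, List.flatMap_cons, List.foldl_append, ih]
    unfold writeGroup writeOne
    rw [List.foldl_map]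

-- every write's value is the closed form at its position, and the position is in range
theorem writes_sound (xs : List String) :
    ∀ w ∈ writesOf xs, w.1 < xs.length ∧ w.2 = cfF xs w.1 := by
  intro w hw
  unfold writesOf at hw
  obtain ⟨kv, hkv, hw⟩ := List.mem_flatMap.mp hw
  obtain ⟨ji, hji, hwe⟩ := List.mem_map.mp hw
  have hval : kv.2 = (groupsOf xs).getD kv.1 [] :=
    (PySem.Dict.getD_of_mem_items (groupsOf xs) (by simpa using hkv)
      (groups_nodup_keys xs) []).symm
  obtain ⟨j, hj, hjie⟩ := (PySem.List.mem_enumerate_iff _ _ _).mp hji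
  have hidx : kv.2[j]? = some ji.2 := by
    rw [hjie]; simp [List.getElem?_eq_getElem hj]
  rw [hval, groups_getD] at hidx
  rw [List.getElem?_map] at hidx
  cases hfi : ((List.range xs.length).filter
      (fun k => nameOfB (xs.getD k "") == kv.1))[j]? with
  | none => rw [hfi] at hidx; simp at hidx
  | some i =>
    rw [hfi] at hidx
    simp only [Option.map_some, Option.some.injEq] at hidx
    obtain ⟨hi, hP, hcnt⟩ := rank_eq_cnt xs kv.1 j i hfi
    have hji1 : ji.1 = (j : Int) := by rw [hjie]; simp
    have hji2 : ji.2 = Int.ofNat i := hidx.symm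
    constructor
    · rw [← hwe]; simp [hji2, Int.ofNat_eq_natCast]; omega
    · rw [← hwe]
      simp only [hji1, hji2, Int.ofNat_eq_natCast, Int.toNat_natCast]
      unfold cfF
      rw [hcnt, PySem.List.pyGetD_natCast]

-- every position below the length is written at least once
theorem writes_cover (xs : List String) (k : Nat) (hk : k < xs.length) :
    ∃ w ∈ writesOf xs, w.1 = k := by
  set name := nameOfB (xs.getD k "") with hname
  have hmemf : k ∈ (List.range xs.length).filter
      (fun j => nameOfB (xs.getD j "") == name) := by
    rw [List.mem_filter]
    refine ⟨List.mem_range.mpr hk, ?_⟩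
    simp only [beq_iff_eq]
    exact hname.symm
  obtain ⟨j, hj, hje⟩ := List.getElem_of_mem hmemf
  -- name is a key of the dict
  have hkey : name ∈ (groupsOf xs).keys := by
    unfold groupsOf
    rw [buildG_mem_keys]
    right
    rw [enum_eq, List.map_map]
    exact List.mem_map.mpr ⟨k, List.mem_range.mpr hk, rfl⟩
  have hget : ∃ v, (groupsOf xs).get? name = some v := by
    cases hq : (groupsOf xs).get? name with
    | some v => exact ⟨v, rfl⟩
    | none =>
      exact absurd ((PySem.Dict.get?_eq_none_iff_not_mem_keys _ _).mp hq) (by simp [hkey])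
  obtain ⟨v, hv⟩ := hget
  have hitems : (name, v) ∈ (groupsOf xs).items :=
    PySem.Dict.mem_items_of_get?_eq_some _ hv
  have hvval : v = (groupsOf xs).getD name [] :=
    (PySem.Dict.getD_of_mem_items (groupsOf xs) hitems (groups_nodup_keys xs) []).symm
  have hkv : Int.ofNat k ∈ v := by
    rw [hvval, groups_getD]
    exact List.mem_map.mpr ⟨k, hmemf, rfl⟩
  obtain ⟨j', hj', hje'⟩ := List.getElem_of_mem hkv
  refine ⟨(((Int.ofNat k).toNat), renumberB (PySem.List.pyGetD xs (Int.ofNat k) "") ((j' : Int) + 1)), ?_,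
    by simp [Int.ofNat_eq_natCast]⟩
  unfold writesOf
  apply List.mem_flatMap.mpr
  refine ⟨(name, v), hitems, ?_⟩
  apply List.mem_map.mpr
  refine ⟨((j' : Int), (k : Int)), ?_, rfl⟩
  apply (PySem.List.mem_enumerate_iff _ _ _).mpr
  exact ⟨j', hj', by simp [hje']⟩

-- B computes the closed form
theorem portB_eq (xs : List String) :
    update_image_paths_alt xs = (List.range xs.length).map (cfF xs) := by
  rw [altB_eq_applyWrites]
  have hlt : ∀ w ∈ writesOf xs, w.1 < (List.replicate xs.length "").length := by
    intro w hw; rw [List.length_replicate]; exact (writes_sound xs w hw).1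
  apply List.ext_getElem
  · rw [applyWrites_length]; simp
  · intro k h1 h2
    have hk : k < xs.length := by
      rw [applyWrites_length, List.length_replicate] at h1; exact h1
    have hgd : (applyWrites (writesOf xs) (List.replicate xs.length "")).getD k ""
        = cfF xs k := by
      rw [applyWrites_getD _ _ _ hlt]
      obtain ⟨w, hw, hwk⟩ := writes_cover xs k hk
      cases hfind : (writesOf xs).reverse.find? (fun w => w.1 == k) with
      | none =>
        exfalso
        have := List.find?_eq_none.mp hfind w (List.mem_reverse.mpr hw)
        simp [hwk] at this
      | some w' =>
        have hmem : w' ∈ writesOf xs := List.mem_reverse.mp (List.mem_of_find?_eq_some hfind)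
        have hpk : w'.1 = k := by
          have := List.find?_some hfind; simpa using this
        show w'.2 = cfF xs k
        rw [(writes_sound xs w' hmem).2, hpk]
    rw [← List.getD_eq_getElem _ "" h1, hgd, List.getElem_map, List.getElem_range]

-- ===== VERDICT (by name: the statement is the Claim_ definition above) =====
theorem update_image_paths_spec : Claim_equal_update_image_paths := by
  intro xs _ _
  unfold Spec_update_image_paths
  rw [portA_eq, portB_eq]
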